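-- pv_equiv track=rewrite | github.com/Camilaaoko/Streamlit_Sentiment_analysis | modelTraining.py | convert_numerical_ratings
-- ===== SOURCE A (Python) =====
-- def convert_numerical_ratings(text):
--     ratings_map = {
--         "10": " very positive ",  # Note: Added spaces
--         "9": " very positive ",
--         "8": " positive ",
--         "7": " positive ",
--         "6": " slightly positive ",
--         "5": " neutral ",
--         "4": " slightly negative ",
--         "3": " negative ",
--         "2": " very negative ",
--         "1": " very negative ",
--     }
--     for num, sentiment in ratings_map.items():
--         text = text.replace(num, sentiment)  # Replace regardless of surrounding chars
--     return text
-- ===== SOURCE B (Python) =====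
-- def convert_numerical_ratings(text):
--     single = {
--         "9": " very positive ",
--         "8": " positive ",
--         "7": " positive ",
--         "6": " slightly positive ",
--         "5": " neutral ",
--         "4": " slightly negative ",
--         "3": " negative ",
--         "2": " very negative ",
--         "1": " very negative ",
--     }
--     pieces = []
--     i = 0
--     n = len(text)
--     while i < n:
--         ch = text[i]
--         if ch == "1" and i + 1 < n and text[i + 1] == "0":
--             pieces.append(" very positive ")
--             i += 2
--         else:
--             pieces.append(single.get(ch, ch))
--             i += 1
--     return "".join(pieces)
-- ===== Notes on version B (the rewrite author's own statement) =====
-- stated objective: alternative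
-- what changed: Replaces the ten sequential whole-string str.replace passes with one left-to-right scan that greedily matches the two-character rating first, maps each single digit (or copies the character), and joins the collected pieces.
import Mathlib
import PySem

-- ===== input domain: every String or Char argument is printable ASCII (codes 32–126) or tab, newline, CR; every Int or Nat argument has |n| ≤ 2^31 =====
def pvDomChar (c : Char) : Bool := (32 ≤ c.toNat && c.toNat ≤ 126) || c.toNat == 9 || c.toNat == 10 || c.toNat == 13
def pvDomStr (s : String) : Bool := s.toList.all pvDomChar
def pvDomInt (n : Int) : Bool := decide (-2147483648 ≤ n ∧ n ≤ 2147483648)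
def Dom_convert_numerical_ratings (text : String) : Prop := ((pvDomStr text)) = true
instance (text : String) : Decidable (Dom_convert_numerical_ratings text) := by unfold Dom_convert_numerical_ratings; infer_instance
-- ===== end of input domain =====

-- B replaces the ten sequential whole-string str.replace passes of A with a single
-- left-to-right scan (greedy '10' first, then single digits); same return value.

-- ===== PORT A =====
-- A: iterate over the dict items in insertion order, doing text = text.replace(num, sentiment).
def convert_numerical_ratings (text : String) : String :=
  let ratings_map : List (String × String) :=
    [("10", " very positive "), ("9", " very positive "), ("8", " positive "),
     ("7", " positive "), ("6", " slightly positive "), ("5", " neutral "),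
     ("4", " slightly negative "), ("3", " negative "), ("2", " very negative "),
     ("1", " very negative ")]
  ratings_map.foldl (fun t p => PySem.Str.replace t p.1 p.2) text

-- ===== PORT B =====
-- B's dict for single digits (dict.get with the character itself as default).
def pvSingleMap : PySem.Dict Char (List Char) :=
  PySem.Dict.ofList
    [('9', " very positive ".toList), ('8', " positive ".toList), ('7', " positive ".toList),
     ('6', " slightly positive ".toList), ('5', " neutral ".toList),
     ('4', " slightly negative ".toList), ('3', " negative ".toList),
     ('2', " very negative ".toList), ('1', " very negative ".toList)]

-- B's while-loop over the index, as structural recursion on the character list: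
-- '1' followed by '0' consumes two characters, anything else consumes one.
def pvAltGo : List Char → List Char
  | [] => []
  | [c] => pvSingleMap.getD c [c]
  | c :: d :: rest =>
      if c = '1' ∧ d = '0' then " very positive ".toList ++ pvAltGo rest
      else pvSingleMap.getD c [c] ++ pvAltGo (d :: rest)

def convert_numerical_ratings_alt (text : String) : String :=
  String.ofList (pvAltGo text.toList)

-- ===== PRECONDITION & SPEC =====
def Spec_convert_numerical_ratings (text : String) (out : String) : Prop := out = convert_numerical_ratings_alt text
instance (text : String) (out : String) : Decidable (Spec_convert_numerical_ratings text out) := by unfold Spec_convert_numerical_ratings; infer_instance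

-- ===== CLAIM (what is proved, stated in full; the proofs are below) =====
def Claim_equal_convert_numerical_ratings : Prop := ∀ (text : String), Dom_convert_numerical_ratings text → Spec_convert_numerical_ratings text (convert_numerical_ratings text)

-- ===== LEMMAS AND PROOFS =====

-- Single-character replace is a flatMap.
theorem replace_single_go (c : Char) (w : List Char) :
    ∀ (l acc : List Char) (fuel : Nat), l.length ≤ fuel →
      PySem.Chars.replace.go [c] w fuel l acc
        = acc.reverse ++ l.flatMap (fun x => if x = c then w else [x]) := by
  intro l
  induction l with
  | nil =>
      intro acc fuel _
      cases fuel <;> simp [PySem.Chars.replace.go]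
  | cons x t ih =>
      intro acc fuel hf
      cases fuel with
      | zero => simp at hf
      | succ f =>
        simp only [PySem.Chars.replace.go]
        by_cases hx : x = c
        · subst hx
          simp only [List.isPrefixOf, BEq.rfl, Bool.true_and,
            if_true, List.length_cons, List.length_nil, List.drop_succ_cons, List.drop_zero]
          rw [ih (w.reverse ++ acc) f (by simpa using Nat.lt_succ_iff.mp (Nat.lt_of_lt_of_le (Nat.lt_succ_self _) hf))]
          simp
        · have hbeq : ([c].isPrefixOf (x :: t)) = false := by
            simp [List.isPrefixOf]
            exact fun h => (hx (by simpa using h.symm)).elim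
          rw [hbeq]
          simp only [if_false, Bool.false_eq_true]
          rw [ih (x :: acc) f (by simpa using Nat.succ_le_succ_iff.mp hf)]
          simp [hx]

theorem replace_single (s : List Char) (c : Char) (w : List Char) :
    PySem.Chars.replace s [c] w = s.flatMap (fun x => if x = c then w else [x]) := by
  simp [PySem.Chars.replace]
  rw [replace_single_go c w s [] s.length (le_refl _)]
  simp

-- The '10' replacement, characterised structurally.
def pvRep10 : List Char → List Char
  | [] => []
  | [c] => [c]
  | c :: d :: rest =>
      if c = '1' ∧ d = '0' then " very positive ".toList ++ pvRep10 rest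
      else c :: pvRep10 (d :: rest)

theorem replace_ten_go :
    ∀ (l acc : List Char) (fuel : Nat), l.length ≤ fuel →
      PySem.Chars.replace.go ['1', '0'] (" very positive ".toList) fuel l acc
        = acc.reverse ++ pvRep10 l := by
  intro l
  induction l using pvRep10.induct with
  | case1 =>
      intro acc fuel _
      cases fuel <;> simp [PySem.Chars.replace.go, pvRep10]
  | case2 c =>
      intro acc fuel hf
      cases fuel with
      | zero => simp at hf
      | succ f =>
        cases f with
        | zero =>
          simp [PySem.Chars.replace.go, List.isPrefixOf, pvRep10]
        | succ f' =>
          simp [PySem.Chars.replace.go, List.isPrefixOf, pvRep10]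
  | case3 c d rest h ih =>
      intro acc fuel hf
      obtain ⟨hc, hd⟩ := h
      subst hc; subst hd
      cases fuel with
      | zero => simp at hf
      | succ f =>
        simp only [PySem.Chars.replace.go, List.isPrefixOf, BEq.rfl, Bool.true_and,
          if_true, List.length_cons, List.length_nil, List.drop_succ_cons,
          List.drop]
        rw [ih (" very positive ".toList.reverse ++ acc) f
          (by simp at hf ⊢; omega)]
        simp [pvRep10]
  | case4 c d rest h ih =>
      intro acc fuel hf
      cases fuel with
      | zero => simp at hf
      | succ f =>
        have hbeq : (['1', '0'].isPrefixOf (c :: d :: rest)) = false := by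
          simp [List.isPrefixOf]
          intro h1 h0
          exact h ⟨by simpa using h1.symm, by simpa using h0.symm⟩
        simp only [PySem.Chars.replace.go, hbeq, Bool.false_eq_true, if_false]
        rw [ih (c :: acc) f (by simp at hf ⊢; omega)]
        simp [pvRep10, h]

theorem replace_ten (s : List Char) :
    PySem.Chars.replace s ['1', '0'] (" very positive ".toList) = pvRep10 s := by
  simp [PySem.Chars.replace]
  have h := replace_ten_go s [] s.length (le_refl _)
  simpa using h

-- The composition of the nine single-digit flatMaps (digit 9 applied first, digit 1 last).
def pvF (c : Char) (w : List Char) (l : List Char) : List Char :=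
  l.flatMap (fun x => if x = c then w else [x])

def pvComp (l : List Char) : List Char :=
  pvF '1' (" very negative ".toList) (pvF '2' (" very negative ".toList)
    (pvF '3' (" negative ".toList) (pvF '4' (" slightly negative ".toList)
      (pvF '5' (" neutral ".toList) (pvF '6' (" slightly positive ".toList)
        (pvF '7' (" positive ".toList) (pvF '8' (" positive ".toList)
          (pvF '9' (" very positive ".toList) l))))))))

theorem pvComp_append (a b : List Char) : pvComp (a ++ b) = pvComp a ++ pvComp b := by
  simp [pvComp, pvF]

theorem pvComp_cons (x : Char) (l : List Char) : pvComp (x :: l) = pvComp [x] ++ pvComp l := by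
  have : x :: l = [x] ++ l := rfl
  rw [this, pvComp_append]

theorem pvComp_single (c : Char) : pvComp [c] = pvSingleMap.getD c [c] := by
  by_cases h9 : c = '9'; · subst h9; decide
  by_cases h8 : c = '8'; · subst h8; decide
  by_cases h7 : c = '7'; · subst h7; decide
  by_cases h6 : c = '6'; · subst h6; decide
  by_cases h5 : c = '5'; · subst h5; decide
  by_cases h4 : c = '4'; · subst h4; decide
  by_cases h3 : c = '3'; · subst h3; decide
  by_cases h2 : c = '2'; · subst h2; decide
  by_cases h1 : c = '1'; · subst h1; decide
  have L : pvComp [c] = [c] := by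
    simp [pvComp, pvF, h1, h2, h3, h4, h5, h6, h7, h8, h9]
  have hm : pvSingleMap.items = [('9', " very positive ".toList), ('8', " positive ".toList),
      ('7', " positive ".toList), ('6', " slightly positive ".toList), ('5', " neutral ".toList),
      ('4', " slightly negative ".toList), ('3', " negative ".toList),
      ('2', " very negative ".toList), ('1', " very negative ".toList)] := by decide
  rw [L]
  have b9 : (('9' : Char) == c) = false := beq_eq_false_iff_ne.mpr (Ne.symm h9)
  have b8 : (('8' : Char) == c) = false := beq_eq_false_iff_ne.mpr (Ne.symm h8)
  have b7 : (('7' : Char) == c) = false := beq_eq_false_iff_ne.mpr (Ne.symm h7)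
  have b6 : (('6' : Char) == c) = false := beq_eq_false_iff_ne.mpr (Ne.symm h6)
  have b5 : (('5' : Char) == c) = false := beq_eq_false_iff_ne.mpr (Ne.symm h5)
  have b4 : (('4' : Char) == c) = false := beq_eq_false_iff_ne.mpr (Ne.symm h4)
  have b3 : (('3' : Char) == c) = false := beq_eq_false_iff_ne.mpr (Ne.symm h3)
  have b2 : (('2' : Char) == c) = false := beq_eq_false_iff_ne.mpr (Ne.symm h2)
  have b1 : (('1' : Char) == c) = false := beq_eq_false_iff_ne.mpr (Ne.symm h1)
  simp [PySem.Dict.getD, PySem.Dict.get?, hm, List.find?, b1, b2, b3, b4, b5, b6, b7, b8, b9]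

theorem pvComp_vp : pvComp (" very positive ".toList) = " very positive ".toList := by decide

theorem pvMain (l : List Char) : pvComp (pvRep10 l) = pvAltGo l := by
  induction l using pvRep10.induct with
  | case1 => simp [pvRep10, pvAltGo, pvComp, pvF]
  | case2 c => simp [pvRep10, pvAltGo, pvComp_single]
  | case3 c d rest h ih =>
      obtain ⟨hc, hd⟩ := h; subst hc; subst hd
      simp only [pvRep10, pvAltGo, and_self, if_true]
      rw [pvComp_append, pvComp_vp, ih]
  | case4 c d rest h ih =>
      simp only [pvRep10, pvAltGo, if_neg h]
      rw [pvComp_cons, pvComp_single, ih]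

-- ===== VERDICT (by name: the statement is the Claim_ definition above) =====
theorem convert_numerical_ratings_spec : Claim_equal_convert_numerical_ratings := by
  intro text _
  unfold Spec_convert_numerical_ratings convert_numerical_ratings convert_numerical_ratings_alt
  simp only [List.foldl, PySem.Str.replace, String.toList_ofList]
  have h10 : "10".toList = ['1', '0'] := by decide
  rw [h10, replace_ten]
  have e9 : "9".toList = ['9'] := by decide
  have e8 : "8".toList = ['8'] := by decide
  have e7 : "7".toList = ['7'] := by decide
  have e6 : "6".toList = ['6'] := by decide
  have e5 : "5".toList = ['5'] := by decide
  have e4 : "4".toList = ['4'] := by decide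
  have e3 : "3".toList = ['3'] := by decide
  have e2 : "2".toList = ['2'] := by decide
  have e1 : "1".toList = ['1'] := by decide
  rw [e9, e8, e7, e6, e5, e4, e3, e2, e1]
  rw [replace_single, replace_single, replace_single, replace_single, replace_single,
    replace_single, replace_single, replace_single, replace_single]
  rw [← pvMain text.toList]
  rfl
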